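-- pv_equiv track=rewrite | github.com/cloudshare/NadavAgentRepo | src/parsers/json_reporter.py | extract_first_error
-- ===== SOURCE A (Python) =====
-- from typing import Optional
--
-- _PRIORITY_NETWORK = 3
--
-- _PRIORITY_TIMEOUT = 2
--
-- _PRIORITY_ASSERTION = 1
--
-- _PRIORITY_UNKNOWN = 0
--
-- _NETWORK_KEYWORDS = [
--     "net::ERR",
--     "ERR_CONNECTION",
--     "navigation timeout",
--     "ERR_ABORTED",
--     "Failed to navigate",
-- ]
--
-- _TIMEOUT_KEYWORDS = [
--     "Timeout",
--     "waiting for",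
--     "exceeded",
-- ]
--
-- _ASSERTION_KEYWORDS = [
--     "Expected",
--     "toBe",
--     "toEqual",
--     "expect(",
--     "received",
-- ]
--
-- def _error_priority(message: str) -> int:
--     """Return priority rank for an error message (higher = more root-cause-like)."""
--     if not message:
--         return _PRIORITY_UNKNOWN
--     for keyword in _NETWORK_KEYWORDS:
--         if keyword in message:
--             return _PRIORITY_NETWORK
--     for keyword in _TIMEOUT_KEYWORDS:
--         if keyword in message:
--             return _PRIORITY_TIMEOUT
--     for keyword in _ASSERTION_KEYWORDS:
--         if keyword in message:
--             return _PRIORITY_ASSERTION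
--     return _PRIORITY_UNKNOWN
--
-- def extract_first_error(
--     errors: list[dict],
-- ) -> tuple[Optional[str], Optional[str], str]:
--     """Apply heuristic priority ranking to identify root cause from errors[].
--
--     Priority order (highest first):
--       1. Navigation/network errors (net::ERR, ERR_CONNECTION, navigation timeout, …)
--       2. Timeout errors (Timeout, waiting for, exceeded)
--       3. Assertion errors (Expected, toBe, toEqual, expect(, received)
--       4. Fallback: chronological first (errors[0])
--
--     Args:
--         errors: List of JSONReportError dicts with optional "message", "stack",
--                 "value" keys.
--
--     Returns:
--         Tuple of (message, stack, confidence) where confidence is "direct" when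
--         errors[0] is chosen naturally and "heuristic" when reordering was applied.
--     """
--     if not errors:
--         return None, None, "direct"
--
--     if len(errors) == 1:
--         err = errors[0]
--         return (
--             err.get("message"),
--             err.get("stack"),
--             "direct",
--         )
--
--     # Find the highest-priority error
--     best_idx = 0
--     best_priority = _error_priority(errors[0].get("message", ""))
--
--     for idx, err in enumerate(errors[1:], start=1):
--         p = _error_priority(err.get("message", ""))
--         if p > best_priority:
--             best_priority = p
--             best_idx = idx
--
--     chosen = errors[best_idx]
--     confidence = "direct" if best_idx == 0 else "heuristic"
--     return chosen.get("message"), chosen.get("stack"), confidence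
-- ===== SOURCE B (Python) =====
-- from typing import Optional
--
-- _NETWORK_KEYWORDS = [
--     "net::ERR",
--     "ERR_CONNECTION",
--     "navigation timeout",
--     "ERR_ABORTED",
--     "Failed to navigate",
-- ]
--
-- _TIMEOUT_KEYWORDS = [
--     "Timeout",
--     "waiting for",
--     "exceeded",
-- ]
--
-- _ASSERTION_KEYWORDS = [
--     "Expected",
--     "toBe",
--     "toEqual",
--     "expect(",
--     "received",
-- ]
--
-- _LEVELS = [
--     (3, _NETWORK_KEYWORDS),
--     (2, _TIMEOUT_KEYWORDS),
--     (1, _ASSERTION_KEYWORDS),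
-- ]
--
--
-- def _prio(message: str) -> int:
--     if message:
--         for level, keywords in _LEVELS:
--             if any(k in message for k in keywords):
--                 return level
--     return 0
--
--
-- def extract_first_error(
--     errors: list[dict],
-- ) -> tuple[Optional[str], Optional[str], str]:
--     if not errors:
--         return None, None, "direct"
--     idx = 0
--     for level, _ in _LEVELS:
--         found = next(
--             (i for i, e in enumerate(errors)
--              if _prio(e.get("message", "")) == level),
--             None,
--         )
--         if found is not None:
--             idx = found
--             break
--     chosen = errors[idx]
--     confidence = "direct" if idx == 0 else "heuristic"
--     return chosen.get("message"), chosen.get("stack"), confidence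
-- ===== Notes on version B (the rewrite author's own statement) =====
-- stated objective: alternative
-- what changed: Replaces the running-argmax pass (tracking best index and best priority) by a scan over the priority levels in descending order, returning the first error whose priority equals the current level, with errors[0] as fallback; the single-element special case disappears.
import Mathlib
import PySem

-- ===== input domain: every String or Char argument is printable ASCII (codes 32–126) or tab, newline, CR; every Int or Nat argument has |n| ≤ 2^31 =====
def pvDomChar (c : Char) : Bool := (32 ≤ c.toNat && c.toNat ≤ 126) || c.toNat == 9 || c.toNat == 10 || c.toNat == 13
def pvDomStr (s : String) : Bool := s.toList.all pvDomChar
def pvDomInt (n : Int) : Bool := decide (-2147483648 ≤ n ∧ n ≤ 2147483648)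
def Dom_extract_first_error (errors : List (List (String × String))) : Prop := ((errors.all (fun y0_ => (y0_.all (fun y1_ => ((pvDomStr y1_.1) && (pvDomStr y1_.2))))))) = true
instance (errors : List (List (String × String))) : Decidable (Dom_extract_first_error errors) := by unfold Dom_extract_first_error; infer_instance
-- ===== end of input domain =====

-- B replaces A's single-pass running argmax (best index + best priority) by a descending
-- scan over the priority levels, taking the first error that matches the current level
-- (objective: alternative decomposition, same cost).

-- ===== PORT A =====
def pvNetworkKeywords : List String :=
  ["net::ERR", "ERR_CONNECTION", "navigation timeout", "ERR_ABORTED", "Failed to navigate"]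
def pvTimeoutKeywords : List String := ["Timeout", "waiting for", "exceeded"]
def pvAssertionKeywords : List String := ["Expected", "toBe", "toEqual", "expect(", "received"]

-- _error_priority: three keyword loops, first hit returns (List.any = first-hit loop)
def errorPriority (message : String) : Int :=
  if message = "" then 0
  else if pvNetworkKeywords.any (fun k => PySem.Str.isIn k message) then 3
  else if pvTimeoutKeywords.any (fun k => PySem.Str.isIn k message) then 2
  else if pvAssertionKeywords.any (fun k => PySem.Str.isIn k message) then 1
  else 0

-- the 'for idx, err in enumerate(errors[1:], start=1)' loop, state (best_idx, best_priority)
def pvLoopA : List (List (String × String)) → Nat → Nat × Int → Nat × Int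
  | [], _, s => s
  | e :: rest, idx, (bi, bp) =>
    let p := errorPriority (PySem.Dict.getD (PySem.Dict.mk e) "message" "")
    if bp < p then pvLoopA rest (idx + 1) (idx, p) else pvLoopA rest (idx + 1) (bi, bp)

def extract_first_error (errors : List (List (String × String))) : Option String × Option String × String :=
  match errors with
  | [] => (none, none, "direct")
  | [e] => (PySem.Dict.get? (PySem.Dict.mk e) "message", PySem.Dict.get? (PySem.Dict.mk e) "stack", "direct")
  | e0 :: rest =>
    let bp0 := errorPriority (PySem.Dict.getD (PySem.Dict.mk e0) "message" "")
    let r := pvLoopA rest 1 (0, bp0)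
    let chosen := (e0 :: rest).getD r.1 []   -- errors[best_idx]; best_idx is always in range
    (PySem.Dict.get? (PySem.Dict.mk chosen) "message", PySem.Dict.get? (PySem.Dict.mk chosen) "stack",
      if r.1 = 0 then "direct" else "heuristic")

-- ===== PORT B =====
def pvLevels : List (Int × List String) :=
  [(3, pvNetworkKeywords), (2, pvTimeoutKeywords), (1, pvAssertionKeywords)]

-- _prio's inner 'for level, keywords in _LEVELS' loop
def prioGo (message : String) : List (Int × List String) → Int
  | [] => 0
  | (lv, kws) :: rest =>
    if kws.any (fun k => PySem.Str.isIn k message) then lv else prioGo message rest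

def prioB (message : String) : Int :=
  if message = "" then 0 else prioGo message pvLevels

-- 'for level, _ in _LEVELS' with next((i for i, e in enumerate(errors) if …), None) = findIdx?
def pvFindLevel (errors : List (List (String × String))) : List (Int × List String) → Option Nat
  | [] => none
  | (lv, _) :: rest =>
    match errors.findIdx? (fun e => prioB (PySem.Dict.getD (PySem.Dict.mk e) "message" "") == lv) with
    | some i => some i
    | none => pvFindLevel errors rest

def extract_first_error_alt (errors : List (List (String × String))) : Option String × Option String × String :=
  match errors with
  | [] => (none, none, "direct")
  | e :: rest =>
    let idx := (pvFindLevel (e :: rest) pvLevels).getD 0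
    let chosen := (e :: rest).getD idx []
    (PySem.Dict.get? (PySem.Dict.mk chosen) "message", PySem.Dict.get? (PySem.Dict.mk chosen) "stack",
      if idx = 0 then "direct" else "heuristic")

-- ===== PRECONDITION & SPEC =====
def Spec_extract_first_error (errors : List (List (String × String))) (out : Option String × Option String × String) : Prop := out = extract_first_error_alt errors
instance (errors : List (List (String × String))) (out : Option String × Option String × String) : Decidable (Spec_extract_first_error errors out) := by unfold Spec_extract_first_error; infer_instance

-- ===== CLAIM (what is proved, stated in full; the proofs are below) =====
def Claim_equal_extract_first_error : Prop := ∀ (errors : List (List (String × String))), Dom_extract_first_error errors → Spec_extract_first_error errors (extract_first_error errors)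

-- ===== LEMMAS AND PROOFS =====

-- priority of err.get("message", "")
def pvPe (e : List (String × String)) : Int :=
  errorPriority (PySem.Dict.getD (PySem.Dict.mk e) "message" "")

def pvMax (bp : Int) (xs : List (List (String × String))) : Int :=
  xs.foldl (fun a e => max a (pvPe e)) bp

theorem prioB_eq (m : String) : prioB m = errorPriority m := by
  by_cases h : m = "" <;>
    simp [prioB, errorPriority, prioGo, pvLevels, h]

theorem pvPe_range (e : List (String × String)) : pvPe e = 0 ∨ pvPe e = 1 ∨ pvPe e = 2 ∨ pvPe e = 3 := by
  unfold pvPe errorPriority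
  split_ifs <;> simp

theorem pvMax_cons (bp : Int) (x : List (String × String)) (xs : List (List (String × String))) :
    pvMax bp (x :: xs) = pvMax (max bp (pvPe x)) xs := rfl

theorem le_pvMax (bp : Int) (xs : List (List (String × String))) : bp ≤ pvMax bp xs := by
  induction xs generalizing bp with
  | nil => simp [pvMax]
  | cons x xs ih =>
    rw [pvMax_cons]
    exact le_trans (le_max_left _ _) (ih _)

theorem pe_le_pvMax (bp : Int) (xs : List (List (String × String))) :
    ∀ e ∈ xs, pvPe e ≤ pvMax bp xs := by
  induction xs generalizing bp with
  | nil => simp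
  | cons x xs ih =>
    intro e he
    rw [pvMax_cons]
    rcases List.mem_cons.mp he with h | h
    · exact h ▸ le_trans (le_max_right _ _) (le_pvMax _ _)
    · exact ih _ e h

theorem pvMax_achieved (bp : Int) (xs : List (List (String × String))) :
    pvMax bp xs = bp ∨ ∃ e ∈ xs, pvPe e = pvMax bp xs := by
  induction xs generalizing bp with
  | nil => simp [pvMax]
  | cons x xs ih =>
    rw [pvMax_cons]
    rcases ih (max bp (pvPe x)) with h | ⟨e, he, hpe⟩
    · rw [h]
      rcases max_choice bp (pvPe x) with h' | h'
      · exact Or.inl h'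
      · exact Or.inr ⟨x, List.mem_cons_self, h'.symm⟩
    · exact Or.inr ⟨e, List.mem_cons_of_mem _ he, hpe⟩

-- characterization of A's argmax loop
theorem pvLoopA_spec (xs : List (List (String × String))) :
    ∀ (i bi : Nat) (bp : Int),
    pvLoopA xs i (bi, bp) =
      if pvMax bp xs ≤ bp then (bi, bp)
      else
        match xs.findIdx? (fun e => pvPe e == pvMax bp xs) with
        | some j => (i + j, pvMax bp xs)
        | none => (bi, bp) := by
  induction xs with
  | nil => intro i bi bp; simp [pvLoopA, pvMax]
  | cons x xs ih =>
    intro i bi bp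
    rw [pvMax_cons]
    show (if bp < pvPe x then pvLoopA xs (i + 1) (i, pvPe x) else pvLoopA xs (i + 1) (bi, bp)) = _
    by_cases hx : bp < pvPe x
    · rw [if_pos hx, ih]
      have hmx : max bp (pvPe x) = pvPe x := max_eq_right (le_of_lt hx)
      rw [hmx]
      have hM : pvPe x ≤ pvMax (pvPe x) xs := le_pvMax _ _
      have hMbp : ¬ pvMax (pvPe x) xs ≤ bp := by omega
      rw [if_neg hMbp]
      by_cases hE : pvMax (pvPe x) xs ≤ pvPe x
      · have heq : pvMax (pvPe x) xs = pvPe x := le_antisymm hE hM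
        rw [if_pos hE, List.findIdx?_cons]
        simp [heq]
      · rw [if_neg hE, List.findIdx?_cons]
        have hne : (pvPe x == pvMax (pvPe x) xs) = false := by
          rw [beq_eq_false_iff_ne]; omega
        rw [hne]
        simp only [Bool.false_eq_true, if_false]
        rcases pvMax_achieved (pvPe x) xs with h | ⟨e, he, hpe⟩
        · omega
        · have : xs.findIdx? (fun e => pvPe e == pvMax (pvPe x) xs) ≠ none := by
            simp only [ne_eq, List.findIdx?_eq_none_iff]
            push_neg
            exact ⟨e, he, by simp [hpe]⟩
          rcases ho : xs.findIdx? (fun e => pvPe e == pvMax (pvPe x) xs) with _ | j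
          · exact absurd ho this
          · simp only [Option.map_some]
            have : i + (j + 1) = i + 1 + j := by omega
            rw [this]
    · rw [if_neg hx, ih]
      have hmx : max bp (pvPe x) = bp := max_eq_left (by omega)
      rw [hmx]
      by_cases hE : pvMax bp xs ≤ bp
      · rw [if_pos hE, if_pos hE]
      · rw [if_neg hE, if_neg hE, List.findIdx?_cons]
        have hne : (pvPe x == pvMax bp xs) = false := by
          rw [beq_eq_false_iff_ne]; omega
        rw [hne]
        simp only [Bool.false_eq_true, if_false]
        rcases pvMax_achieved bp xs with h | ⟨e, he, hpe⟩
        · omega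
        · have : xs.findIdx? (fun e => pvPe e == pvMax bp xs) ≠ none := by
            simp only [ne_eq, List.findIdx?_eq_none_iff]
            push_neg
            exact ⟨e, he, by simp [hpe]⟩
          rcases ho : xs.findIdx? (fun e => pvPe e == pvMax bp xs) with _ | j
          · exact absurd ho this
          · simp only [Option.map_some]
            have : i + (j + 1) = i + 1 + j := by omega
            rw [this]

-- B's predicate equals the A-side predicate
theorem predB_eq (lv : Int) :
    (fun (e : List (String × String)) => prioB (PySem.Dict.getD (PySem.Dict.mk e) "message" "") == lv)
      = (fun e => pvPe e == lv) := by
  funext e; rw [prioB_eq]; rfl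

-- fold the A-side priority-of-message expression into pvPe
theorem pvPe_def (e : List (String × String)) :
    errorPriority (PySem.Dict.getD (PySem.Dict.mk e) "message" "") = pvPe e := rfl

-- pvFindLevel unfolded on the literal level list
theorem pvFindLevel_eq (errors : List (List (String × String))) :
    pvFindLevel errors pvLevels =
      match errors.findIdx? (fun e => pvPe e == 3) with
      | some i => some i
      | none =>
        match errors.findIdx? (fun e => pvPe e == 2) with
        | some i => some i
        | none => errors.findIdx? (fun e => pvPe e == 1) := by
  simp only [pvLevels, pvFindLevel, predB_eq]
  rcases errors.findIdx? (fun e => pvPe e == 3) with _ | i <;>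
    rcases errors.findIdx? (fun e => pvPe e == 2) with _ | i2 <;>
      rcases errors.findIdx? (fun e => pvPe e == 1) with _ | i3 <;> rfl

theorem findIdx?_none_of_ne (lv : Int) (errors : List (List (String × String)))
    (h : ∀ e ∈ errors, pvPe e ≠ lv) :
    errors.findIdx? (fun e => pvPe e == lv) = none := by
  rw [List.findIdx?_eq_none_iff]
  intro e he
  simp [h e he]

theorem findIdx?_cons_pe (lv : Int) (e0 : List (String × String)) (xs : List (List (String × String))) :
    (e0 :: xs).findIdx? (fun e => pvPe e == lv) =
      if pvPe e0 = lv then some 0 else (xs.findIdx? (fun e => pvPe e == lv)).map (· + 1) := by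
  rw [List.findIdx?_cons]
  by_cases h : pvPe e0 = lv <;> simp [h]

-- ===== VERDICT (by name: the statement is the Claim_ definition above) =====
theorem extract_first_error_spec : Claim_equal_extract_first_error := by
  unfold Claim_equal_extract_first_error
  intro errors _
  unfold Spec_extract_first_error
  match errors with
  | [] => rfl
  | [e] =>
    -- B: whatever level (if any) matches first, the found index in [e] is 0, hence "direct"
    have h1 : ∀ lv : Int, [e].findIdx? (fun e => pvPe e == lv) =
        if pvPe e = lv then some 0 else none := by
      intro lv
      rw [findIdx?_cons_pe]
      by_cases h : pvPe e = lv <;> simp [h]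
    rcases pvPe_range e with h | h | h | h <;>
      simp [extract_first_error, extract_first_error_alt, pvFindLevel_eq, h1, h]
  | e0 :: e1 :: rest =>
    simp only [extract_first_error, extract_first_error_alt, pvPe_def, pvFindLevel_eq,
      pvLoopA_spec]
    have hbpM : pvPe e0 ≤ pvMax (pvPe e0) (e1 :: rest) := le_pvMax _ _
    have hle : ∀ e ∈ e0 :: e1 :: rest, pvPe e ≤ pvMax (pvPe e0) (e1 :: rest) := by
      intro e he
      rcases List.mem_cons.mp he with h | h
      · rw [h]; exact hbpM
      · exact pe_le_pvMax _ _ e h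
    have hnone : ∀ lv : Int, pvMax (pvPe e0) (e1 :: rest) < lv →
        (e0 :: e1 :: rest).findIdx? (fun e => pvPe e == lv) = none := by
      intro lv hlv
      exact findIdx?_none_of_ne lv _ (fun e he => by have := hle e he; omega)
    have h0r := pvPe_range e0
    by_cases hMbp : pvMax (pvPe e0) (e1 :: rest) ≤ pvPe e0
    · -- A keeps index 0; B's chosen index is 0 as well (head matches its own level, or all fail)
      rw [if_pos hMbp]
      have hbpeq : pvMax (pvPe e0) (e1 :: rest) = pvPe e0 := le_antisymm hMbp hbpM
      rcases h0r with h0 | h0 | h0 | h0 <;>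
        [ (rw [hnone 3 (by omega), hnone 2 (by omega), hnone 1 (by omega)]);
          (rw [hnone 3 (by omega), hnone 2 (by omega), findIdx?_cons_pe, if_pos h0]);
          (rw [hnone 3 (by omega), findIdx?_cons_pe, if_pos h0]);
          (rw [findIdx?_cons_pe, if_pos h0]) ] <;>
        rfl
    · -- A moves to 1 + j, the first index of the maximum priority; B finds exactly that index
      rw [if_neg hMbp]
      have hex : ∃ e ∈ e1 :: rest, pvPe e = pvMax (pvPe e0) (e1 :: rest) := by
        rcases pvMax_achieved (pvPe e0) (e1 :: rest) with h | h
        · omega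
        · exact h
      have hsome : (e1 :: rest).findIdx? (fun e => pvPe e == pvMax (pvPe e0) (e1 :: rest)) ≠ none := by
        simp only [ne_eq, List.findIdx?_eq_none_iff]; push_neg
        rcases hex with ⟨e, he, hpe⟩
        exact ⟨e, he, by simp [hpe]⟩
      rcases hj : (e1 :: rest).findIdx? (fun e => pvPe e == pvMax (pvPe e0) (e1 :: rest)) with _ | j
      · exact absurd hj hsome
      · have hfull : (e0 :: e1 :: rest).findIdx? (fun e => pvPe e == pvMax (pvPe e0) (e1 :: rest)) =
            some (j + 1) := by
          rw [findIdx?_cons_pe, if_neg (by omega), hj]; rfl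
        have hMr : pvMax (pvPe e0) (e1 :: rest) = 1 ∨ pvMax (pvPe e0) (e1 :: rest) = 2 ∨
            pvMax (pvPe e0) (e1 :: rest) = 3 := by
          rcases hex with ⟨e, _, hpe⟩
          have := pvPe_range e
          omega
        have hf1 : ∀ lv : Int, pvMax (pvPe e0) (e1 :: rest) = lv →
            (e0 :: e1 :: rest).findIdx? (fun e => pvPe e == lv) = some (j + 1) := by
          intro lv hlv; rw [← hlv]; exact hfull
        rcases hMr with hm | hm | hm <;>
          [ (rw [hnone 3 (by omega), hnone 2 (by omega), hf1 1 hm]);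
            (rw [hnone 3 (by omega), hf1 2 hm]);
            (rw [hf1 3 hm]) ] <;>
          simp [Nat.add_comm 1 j]
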